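-- pv_equiv track=rewrite | github.com/akshay-greenlang/Code-V1_GreenLang | packs/net-zero/PACK-023-sbti-alignment/templates/scope3_screening_report.py | _md_materiality_heatmap
-- ===== SOURCE A (Python) =====
-- from typing import Any, Dict, List, Optional
--
-- def _md_materiality_heatmap(data: Dict[str, Any]) -> str:
--     categories = data.get("categories", [])
--     high = [c for c in categories if str(c.get("materiality", "")).upper() == "HIGH"]
--     medium = [c for c in categories if str(c.get("materiality", "")).upper() == "MEDIUM"]
--     low = [c for c in categories if str(c.get("materiality", "")).upper() == "LOW"]
--     negligible = [c for c in categories if str(c.get("materiality", "")).upper() == "NEGLIGIBLE"]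
--
--     lines = [
--         "## 3. Materiality Heatmap\n",
--         f"| Level | Count | Categories |",
--         f"|-------|:-----:|------------|",
--     ]
--     for level, items in [
--         ("High", high), ("Medium", medium),
--         ("Low", low), ("Negligible", negligible),
--     ]:
--         cat_names = ", ".join(
--             f"Cat {c.get('number', '?')}" for c in items
--         ) if items else "None"
--         lines.append(f"| {level} | {len(items)} | {cat_names} |")
--
--     lines.append("")
--     lines.append(
--         f"**Material categories (High + Medium):** "
--         f"{len(high) + len(medium)} of {len(categories)}"
--     )
--     return "\n".join(lines)
-- ===== SOURCE B (Python) =====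
-- def _md_materiality_heatmap(data):
--     categories = data.get("categories", [])
--     # one pass: bucket categories by uppercased materiality (order preserved)
--     groups = {}
--     for c in categories:
--         groups.setdefault(str(c.get("materiality", "")).upper(), []).append(c)
--
--     rows = []
--     material = 0
--     for label, key in (("High", "HIGH"), ("Medium", "MEDIUM"),
--                        ("Low", "LOW"), ("Negligible", "NEGLIGIBLE")):
--         items = groups.get(key, [])
--         if key in ("HIGH", "MEDIUM"):
--             material += len(items)
--         names = ", ".join("Cat {}".format(c.get("number", "?")) for c in items) if items else "None"
--         rows.append("| {} | {} | {} |".format(label, len(items), names))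
--
--     return "\n".join(
--         [
--             "## 3. Materiality Heatmap\n",
--             "| Level | Count | Categories |",
--             "|-------|:-----:|------------|",
--         ]
--         + rows
--         + ["", "**Material categories (High + Medium):** {} of {}".format(material, len(categories))]
--     )
-- ===== Notes on version B (the rewrite author's own statement) =====
-- stated objective: alternative
-- what changed: B buckets the categories by uppercased materiality in a single dict-building pass and reads the four levels from the index, instead of A's four separate filtering scans over the category list; row formatting and the material-count footer are driven by one loop over (label, key) pairs.
import Mathlib
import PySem

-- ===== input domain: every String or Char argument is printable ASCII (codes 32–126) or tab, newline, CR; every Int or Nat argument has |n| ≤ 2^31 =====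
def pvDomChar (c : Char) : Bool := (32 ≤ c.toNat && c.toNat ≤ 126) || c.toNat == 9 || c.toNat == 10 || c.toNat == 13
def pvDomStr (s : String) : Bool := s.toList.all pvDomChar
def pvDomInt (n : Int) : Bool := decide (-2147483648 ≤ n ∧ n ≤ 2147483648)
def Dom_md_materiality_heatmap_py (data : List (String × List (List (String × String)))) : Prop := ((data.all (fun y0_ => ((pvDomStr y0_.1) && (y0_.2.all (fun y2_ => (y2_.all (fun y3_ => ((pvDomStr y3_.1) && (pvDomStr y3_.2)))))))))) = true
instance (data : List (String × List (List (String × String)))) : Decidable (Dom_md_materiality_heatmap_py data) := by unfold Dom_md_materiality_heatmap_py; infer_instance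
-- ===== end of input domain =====

-- B groups the categories into buckets by one dict-building pass instead of A's four list-comprehension scans (alternative decomposition, same result).


-- ===== PORT A =====
-- str(c.get("materiality", "")).upper()  (str() on a str is the identity)
def pvMatKey (c : List (String × String)) : String :=
  PySem.Str.upper ((PySem.Dict.mk c).getD "materiality" "")

-- "Cat {c.get('number', '?')}"
def pvCatName (c : List (String × String)) : String :=
  "Cat " ++ (PySem.Dict.mk c).getD "number" "?"

def md_materiality_heatmap_py (data : List (String × List (List (String × String)))) : String :=
  let categories := (PySem.Dict.mk data).getD "categories" []
  let high := categories.filter (fun c => pvMatKey c == "HIGH")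
  let medium := categories.filter (fun c => pvMatKey c == "MEDIUM")
  let low := categories.filter (fun c => pvMatKey c == "LOW")
  let negligible := categories.filter (fun c => pvMatKey c == "NEGLIGIBLE")
  let lines : List String :=
    [ "## 3. Materiality Heatmap\n",
      "| Level | Count | Categories |",
      "|-------|:-----:|------------|" ]
  let lines := [("High", high), ("Medium", medium), ("Low", low), ("Negligible", negligible)].foldl
    (fun (lines : List String) (li : String × List (List (String × String))) =>
      let catNames := if li.2.isEmpty then "None"
                      else PySem.Str.join ", " (li.2.map pvCatName)
      lines ++ ["| " ++ li.1 ++ " | " ++ PySem.Int.toStr (li.2.length : Int) ++ " | " ++ catNames ++ " |"])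
    lines
  let lines := lines ++ [""]
  let lines := lines ++
    ["**Material categories (High + Medium):** " ++
      PySem.Int.toStr ((high.length : Int) + (medium.length : Int)) ++ " of " ++
      PySem.Int.toStr (categories.length : Int)]
  PySem.Str.join "\n" lines

-- ===== PORT B =====
def md_materiality_heatmap_py_alt (data : List (String × List (List (String × String)))) : String :=
  let categories := (PySem.Dict.mk data).getD "categories" []
  -- one pass: groups.setdefault(key, []).append(c)
  let groups := categories.foldl
    (fun (g : PySem.Dict String (List (List (String × String)))) c =>
      g.modify (pvMatKey c) [] (· ++ [c]))
    PySem.Dict.empty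
  let st := [("High", "HIGH"), ("Medium", "MEDIUM"), ("Low", "LOW"), ("Negligible", "NEGLIGIBLE")].foldl
    (fun (st : List String × Int) (lk : String × String) =>
      let items := groups.getD lk.2 []
      let material := if lk.2 == "HIGH" || lk.2 == "MEDIUM" then st.2 + (items.length : Int) else st.2
      let names := if items.isEmpty then "None"
                   else PySem.Str.join ", " (items.map pvCatName)
      (st.1 ++ ["| " ++ lk.1 ++ " | " ++ PySem.Int.toStr (items.length : Int) ++ " | " ++ names ++ " |"], material))
    ([], 0)
  PySem.Str.join "\n"
    ([ "## 3. Materiality Heatmap\n",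
       "| Level | Count | Categories |",
       "|-------|:-----:|------------|" ]
     ++ st.1
     ++ ["", "**Material categories (High + Medium):** " ++
           PySem.Int.toStr st.2 ++ " of " ++ PySem.Int.toStr (categories.length : Int)])

-- ===== PRECONDITION & SPEC =====
def Spec_md_materiality_heatmap_py (data : List (String × List (List (String × String)))) (out : String) : Prop := out = md_materiality_heatmap_py_alt data
instance (data : List (String × List (List (String × String)))) (out : String) : Decidable (Spec_md_materiality_heatmap_py data out) := by unfold Spec_md_materiality_heatmap_py; infer_instance

-- ===== CLAIM (what is proved, stated in full; the proofs are below) =====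
def Claim_equal_md_materiality_heatmap_py : Prop := ∀ (data : List (String × List (List (String × String)))), Dom_md_materiality_heatmap_py data → Spec_md_materiality_heatmap_py data (md_materiality_heatmap_py data)

-- ===== LEMMAS AND PROOFS =====

-- the grouping dict read at key L is exactly A's filter at L (per-bucket order preserved)
theorem pvGroup_getD (categories : List (List (String × String))) (L : String) :
    (categories.foldl
      (fun (g : PySem.Dict String (List (List (String × String)))) c =>
        g.modify (pvMatKey c) [] (· ++ [c]))
      PySem.Dict.empty).getD L []
    = categories.filter (fun c => pvMatKey c == L) := by
  have h : categories.foldl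
      (fun (g : PySem.Dict String (List (List (String × String)))) c =>
        g.modify (pvMatKey c) [] (· ++ [c])) PySem.Dict.empty
      = (categories.map (fun c => (pvMatKey c, c))).foldl
          (fun g p => g.modify p.1 [] (· ++ [p.2])) PySem.Dict.empty := by
    rw [List.foldl_map]
  rw [h, PySem.Dict.getD_foldl_modify_append]
  simp [List.filter_map, Function.comp_def]

-- ===== VERDICT (by name: the statement is the Claim_ definition above) =====
theorem md_materiality_heatmap_py_spec : Claim_equal_md_materiality_heatmap_py := by
  intro data _
  unfold Spec_md_materiality_heatmap_py md_materiality_heatmap_py md_materiality_heatmap_py_alt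
  simp only [List.foldl, pvGroup_getD]
  simp
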